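-- pv_equiv track=rewrite | github.com/JadowityHerbatnik/Sylabizator | Sylabizator.py | fonet
-- ===== SOURCE A (Python) =====
-- wymowasp = ['au', 'eu']
--
-- def fonet(gloski):  # jezeli samogloska jest wymawiana jako spolgloska, zwroc indeksy takich polaczen
--     innawymowa = []
--     for a in wymowasp:
--         for b in range(len(gloski) - 1):
--             string = ''
--             string += gloski[b]
--             string += gloski[b + 1]
--             if a == string.lower():
--                 innawymowa.append(b)
--     return innawymowa
-- ===== SOURCE B (Python) =====
-- wymowasp = ['au', 'eu']
--
-- def fonet(gloski):
--     au_idx = []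
--     eu_idx = []
--     for b in range(len(gloski) - 1):
--         pair = (gloski[b] + gloski[b + 1]).lower()
--         if pair == 'au':
--             au_idx.append(b)
--         elif pair == 'eu':
--             eu_idx.append(b)
--     return au_idx + eu_idx
-- ===== Notes on version B (the rewrite author's own statement) =====
-- stated objective: alternative
-- what changed: A rescans the whole adjacent-pair sequence once per target pair ('au' then 'eu'); B makes a single pass over the indices, bucketing 'au' and 'eu' matches into two lists and concatenating them, reproducing the grouped order.
import Mathlib
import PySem

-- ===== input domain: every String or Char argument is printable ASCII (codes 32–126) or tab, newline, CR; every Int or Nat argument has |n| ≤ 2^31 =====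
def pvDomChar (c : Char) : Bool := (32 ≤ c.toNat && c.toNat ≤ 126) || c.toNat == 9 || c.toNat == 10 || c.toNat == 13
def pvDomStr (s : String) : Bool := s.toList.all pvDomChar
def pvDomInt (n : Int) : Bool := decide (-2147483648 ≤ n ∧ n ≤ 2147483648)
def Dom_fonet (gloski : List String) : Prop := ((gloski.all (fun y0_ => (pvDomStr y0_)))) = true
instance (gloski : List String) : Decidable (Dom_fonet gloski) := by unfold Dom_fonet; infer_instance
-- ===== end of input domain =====

-- B makes ONE pass over the adjacent-pair indices, bucketing 'au'/'eu' matches,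
-- instead of A's rescan of all pairs once per target string; same return value.

-- ===== PORT A =====
def wymowasp : List String := ["au", "eu"]

def fonet (gloski : List String) : List Int :=
  wymowasp.foldl
    (fun innawymowa a =>
      (PySem.List.pyRange 0 ((gloski.length : Int) - 1) 1).foldl
        (fun acc b =>
          let string0 : String := ""
          let string1 := string0 ++ PySem.List.pyGetD gloski b ""
          let string2 := string1 ++ PySem.List.pyGetD gloski (b + 1) ""
          if a = PySem.Str.lower string2 then acc ++ [b] else acc)
        innawymowa)
    []

-- ===== PORT B =====
def fonet_alt (gloski : List String) : List Int :=
  let st :=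
    (PySem.List.pyRange 0 ((gloski.length : Int) - 1) 1).foldl
      (fun (st : List Int × List Int) b =>
        let pair := PySem.Str.lower
          (PySem.List.pyGetD gloski b "" ++ PySem.List.pyGetD gloski (b + 1) "")
        if pair = "au" then (st.1 ++ [b], st.2)
        else if pair = "eu" then (st.1, st.2 ++ [b])
        else st)
      ([], [])
  st.1 ++ st.2

-- ===== PRECONDITION & SPEC =====
def Spec_fonet (gloski : List String) (out : List Int) : Prop := out = fonet_alt gloski
instance (gloski : List String) (out : List Int) : Decidable (Spec_fonet gloski out) := by unfold Spec_fonet; infer_instance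

-- ===== CLAIM (what is proved, stated in full; the proofs are below) =====
def Claim_equal_fonet : Prop := ∀ (gloski : List String), Dom_fonet gloski → Spec_fonet gloski (fonet gloski)

-- ===== LEMMAS AND PROOFS =====

-- the lowercased pair at index b (shared characterisation of both ports' tests)
def pvPair (gloski : List String) (b : Int) : String :=
  PySem.Str.lower (("" : String) ++ PySem.List.pyGetD gloski b "" ++ PySem.List.pyGetD gloski (b + 1) "")

theorem pvB_fold (gloski : List String) (L : List Int) (au eu : List Int) :
    L.foldl
      (fun (st : List Int × List Int) b =>
        let pair := PySem.Str.lower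
          (PySem.List.pyGetD gloski b "" ++ PySem.List.pyGetD gloski (b + 1) "")
        if pair = "au" then (st.1 ++ [b], st.2)
        else if pair = "eu" then (st.1, st.2 ++ [b])
        else st)
      (au, eu)
    = (au ++ L.filter (fun b => pvPair gloski b = "au"),
       eu ++ L.filter (fun b => pvPair gloski b = "eu")) := by
  induction L generalizing au eu with
  | nil => simp
  | cons x xs ih =>
    have hx : PySem.Str.lower
        (PySem.List.pyGetD gloski x "" ++ PySem.List.pyGetD gloski (x + 1) "")
        = pvPair gloski x := by simp [pvPair]
    simp only [List.foldl_cons, List.filter_cons, hx]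
    by_cases h1 : pvPair gloski x = "au"
    · simp [h1, ih]
    · by_cases h2 : pvPair gloski x = "eu"
      · simp [h2, ih]
      · simp [h1, h2, ih]

theorem pvA_inner (gloski : List String) (a : String) (L : List Int) (acc : List Int) :
    L.foldl
      (fun acc b =>
        let string0 : String := ""
        let string1 := string0 ++ PySem.List.pyGetD gloski b ""
        let string2 := string1 ++ PySem.List.pyGetD gloski (b + 1) ""
        if a = PySem.Str.lower string2 then acc ++ [b] else acc)
      acc
    = acc ++ L.filter (fun b => pvPair gloski b = a) := by
  induction L generalizing acc with
  | nil => simp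
  | cons x xs ih =>
    rw [List.foldl_cons, ih, List.filter_cons]
    have hq : PySem.Str.lower
        (PySem.List.pyGetD gloski x "" ++ PySem.List.pyGetD gloski (x + 1) "")
        = pvPair gloski x := by simp [pvPair]
    by_cases h : a = pvPair gloski x
    · simp [hq, h]
    · have h' : ¬ pvPair gloski x = a := fun e => h e.symm
      simp [hq, h, h']

-- ===== VERDICT (by name: the statement is the Claim_ definition above) =====
theorem fonet_spec : Claim_equal_fonet := by
  intro gloski _
  unfold Spec_fonet fonet fonet_alt wymowasp
  simp only [List.foldl_cons, List.foldl_nil, pvA_inner, pvB_fold, List.nil_append]
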